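-- pv_equiv track=rewrite | github.com/ShawK91/l2m | models/knet.py | init_allocation
-- ===== SOURCE A (Python) =====
-- def init_allocation(neurone_dim, col_dim):
--     allocation = []
--     ration = int(neurone_dim/col_dim)
--     counter = 0
--     for i in range(col_dim):
--         allocation.append([])
--         for _ in range(ration):
--             allocation[-1].append(counter)
--             counter+=1
--
--     #Put all remaining to last entry
--     while counter < neurone_dim:
--         allocation[-1].append(counter)
--         counter += 1
--
--     entropy = [None for _ in range(col_dim)]
--
--     return allocation, entropy
-- ===== SOURCE B (Python) =====
-- def init_allocation(neurone_dim, col_dim):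
--     ration = int(neurone_dim/col_dim)
--     buckets = [[] for _ in range(col_dim)]
--     for j in range(neurone_dim):
--         g = min(j // ration, col_dim - 1) if ration > 0 else col_dim - 1
--         buckets[g].append(j)
--     entropy = [None] * col_dim
--     return buckets, entropy
-- ===== Notes on version B (the rewrite author's own statement) =====
-- stated objective: alternative
-- what changed: B inverts the loop structure: instead of A's sequential group construction (nested counter loops over groups plus a trailing remainder while-loop mutating the last group), B preallocates the buckets and makes a single pass over the neurons, computing each neuron's group index arithmetically as min(j // ration, col_dim - 1) and scattering it into its bucket.
import Mathlib
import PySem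

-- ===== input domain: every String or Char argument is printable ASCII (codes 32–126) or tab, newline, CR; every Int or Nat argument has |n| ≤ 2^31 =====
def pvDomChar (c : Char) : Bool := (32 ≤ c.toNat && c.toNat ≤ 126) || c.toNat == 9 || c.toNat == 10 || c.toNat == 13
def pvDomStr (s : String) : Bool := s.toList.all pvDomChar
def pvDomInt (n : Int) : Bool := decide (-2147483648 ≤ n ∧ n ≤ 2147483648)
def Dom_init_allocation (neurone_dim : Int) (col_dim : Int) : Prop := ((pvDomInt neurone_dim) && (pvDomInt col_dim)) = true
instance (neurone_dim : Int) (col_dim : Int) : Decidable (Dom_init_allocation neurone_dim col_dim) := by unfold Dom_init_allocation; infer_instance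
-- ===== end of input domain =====

-- B inverts the loop: one pass over the neurons, each scattered into the bucket
-- min(j // ration, col_dim - 1), instead of A's sequential group construction; objective: alternative.


-- ===== PORT A =====
-- allocation[-1].append(x): appends x to the last group; on an empty list Python raises
-- IndexError (excluded by Pre_), here the list is returned unchanged.
def pvAppendLast : List (List Int) → Int → List (List Int)
  | [], _ => []
  | [g], x => [g ++ [x]]
  | g :: h :: rest, x => g :: pvAppendLast (h :: rest) x

-- the trailing 'while counter < neurone_dim' loop
def pvWhileA (n : Int) (alloc : List (List Int)) (counter : Int) : List (List Int) :=
  if counter < n then pvWhileA n (pvAppendLast alloc counter) (counter + 1) else alloc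
termination_by (n - counter).toNat
decreasing_by omega

-- int(neurone_dim/col_dim): Python float division then int() truncates toward zero;
-- PySem.Int.truncdiv is exact for |arguments| ≤ 2^31 (inside Dom).
def init_allocation (neurone_dim : Int) (col_dim : Int) : List (List Int) × List (Option Int) :=
  let ration := PySem.Int.truncdiv neurone_dim col_dim
  let s := (PySem.List.pyRange 0 col_dim 1).foldl
    (fun (st : List (List Int) × Int) _ =>
      let st1 : List (List Int) × Int := (st.1 ++ [[]], st.2)
      (PySem.List.pyRange 0 ration 1).foldl
        (fun (t : List (List Int) × Int) _ => (pvAppendLast t.1 t.2, t.2 + 1)) st1)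
    ([], 0)
  let allocation := pvWhileA neurone_dim s.1 s.2
  let entropy := (PySem.List.pyRange 0 col_dim 1).map (fun _ => (none : Option Int))
  (allocation, entropy)

-- ===== PORT B =====
-- buckets[g].append(j): read buckets[g] (Python index semantics), write it back with j
-- appended; none = IndexError (unreached inside Pre_), the list is returned unchanged there.
def pvBucketAppend (bs : List (List Int)) (g : Int) (x : Int) : List (List Int) :=
  match PySem.List.pyGet? bs g with
  | some b => PySem.List.pySetD bs g (b ++ [x])
  | none => bs

def init_allocation_alt (neurone_dim : Int) (col_dim : Int) : List (List Int) × List (Option Int) :=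
  let ration := PySem.Int.truncdiv neurone_dim col_dim
  let buckets0 := (PySem.List.pyRange 0 col_dim 1).map (fun _ => ([] : List Int))
  let buckets := (PySem.List.pyRange 0 neurone_dim 1).foldl
    (fun bs j =>
      let g := if ration > 0 then min (PySem.Int.floordiv j ration) (col_dim - 1) else col_dim - 1
      pvBucketAppend bs g j) buckets0
  let entropy : List (Option Int) := List.replicate col_dim.toNat none  -- [None] * col_dim
  (buckets, entropy)

-- ===== PRECONDITION & SPEC =====
-- Pre_ excludes exactly where A raises: col_dim = 0 (ZeroDivisionError) and
-- col_dim < 0 with neurone_dim > 0 (IndexError on allocation[-1] of the empty list;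
-- B raises IndexError there too).
def Pre_init_allocation (neurone_dim : Int) (col_dim : Int) : Prop :=
  col_dim ≠ 0 ∧ (0 < col_dim ∨ neurone_dim ≤ 0)
instance (neurone_dim : Int) (col_dim : Int) : Decidable (Pre_init_allocation neurone_dim col_dim) := by unfold Pre_init_allocation; infer_instance
def pvWitness_init_allocation : Int × Int := (7, 3)

def Spec_init_allocation (neurone_dim : Int) (col_dim : Int) (out : List (List Int) × List (Option Int)) : Prop := out = init_allocation_alt neurone_dim col_dim
instance (neurone_dim : Int) (col_dim : Int) (out : List (List Int) × List (Option Int)) : Decidable (Spec_init_allocation neurone_dim col_dim out) := by unfold Spec_init_allocation; infer_instance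

-- ===== CLAIM (what is proved, stated in full; the proofs are below) =====
def Claim_equal_init_allocation : Prop := ∀ (neurone_dim : Int) (col_dim : Int), Dom_init_allocation neurone_dim col_dim → Pre_init_allocation neurone_dim col_dim → Spec_init_allocation neurone_dim col_dim (init_allocation neurone_dim col_dim)

-- ===== LEMMAS AND PROOFS =====

theorem pvTruncdiv_eq (a b : Int) : PySem.Int.truncdiv a b = a.tdiv b := rfl

-- the common closed form both ports are reduced to: group i is the range
-- [i*ration, i*ration+ration), the last group ends at neurone_dim instead
def pvSpecForm (neurone_dim : Int) (col_dim : Int) : List (List Int) × List (Option Int) :=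
  let ration := neurone_dim.tdiv col_dim
  let allocation := (PySem.List.pyRange 0 col_dim 1).map (fun i =>
    let start := i * ration
    let e := if i = col_dim - 1 then neurone_dim else start + ration
    PySem.List.pyRange start e 1)
  (allocation, List.replicate col_dim.toNat none)

theorem pvAppendLast_append (xss : List (List Int)) (g : List Int) (x : Int) :
    pvAppendLast (xss ++ [g]) x = xss ++ [g ++ [x]] := by
  induction xss with
  | nil => rfl
  | cons h t ih =>
    cases t with
    | nil => simp [pvAppendLast]
    | cons h' t' => simpa [pvAppendLast] using ih

-- inner 'for _ in range(ration)' loop: appends a range to the last group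
theorem innerFold_eq (l : List Int) (xss : List (List Int)) (g : List Int) (cnt : Int) :
    l.foldl (fun (t : List (List Int) × Int) _ => (pvAppendLast t.1 t.2, t.2 + 1)) (xss ++ [g], cnt)
      = (xss ++ [g ++ PySem.List.pyRange cnt (cnt + l.length) 1], cnt + l.length) := by
  induction l generalizing g cnt with
  | nil => simp [PySem.List.pyRange_one_eq_nil]
  | cons a t ih =>
    simp only [List.foldl_cons, pvAppendLast_append]
    rw [ih]
    have hlt : cnt < cnt + ((a :: t).length : Int) := by
      simp only [List.length_cons]; push_cast; omega
    rw [PySem.List.pyRange_one_cons hlt]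
    simp only [Prod.mk.injEq, List.length_cons]
    push_cast
    refine ⟨?_, by ring⟩
    have h1 : cnt + 1 + (t.length : Int) = cnt + ((t.length : Int) + 1) := by ring
    rw [h1]
    simp [List.append_assoc]

-- outer 'for i in range(col_dim)' loop
theorem outerFold_eq (r : Int) (l : List Int) (xss : List (List Int)) (cnt : Int) :
    l.foldl (fun (st : List (List Int) × Int) _ =>
        let st1 : List (List Int) × Int := (st.1 ++ [[]], st.2)
        (PySem.List.pyRange 0 r 1).foldl
          (fun (t : List (List Int) × Int) _ => (pvAppendLast t.1 t.2, t.2 + 1)) st1)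
      (xss, cnt)
      = (xss ++ (List.range l.length).map
            (fun (j : Nat) => PySem.List.pyRange (cnt + (j : Int) * ((r.toNat : Int))) (cnt + (j : Int) * ((r.toNat : Int)) + ((r.toNat : Int))) 1),
         cnt + l.length * (r.toNat : Int)) := by
  induction l generalizing xss cnt with
  | nil => simp
  | cons a t ih =>
    simp only [List.foldl_cons]
    rw [innerFold_eq (PySem.List.pyRange 0 r 1) xss [] cnt]
    have hlen : ((PySem.List.pyRange 0 r 1).length : Int) = (r.toNat : Int) := by
      rw [PySem.List.length_pyRange_one]; norm_num
    rw [hlen, ih]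
    simp only [Prod.mk.injEq, List.length_cons, List.nil_append, List.append_assoc,
               List.singleton_append]
    refine ⟨?_, by push_cast; ring⟩
    rw [List.range_succ_eq_map, List.map_cons, List.map_map]
    congr 1
    simp only [List.cons.injEq]
    refine ⟨by simp, ?_⟩
    apply List.map_congr_left
    intro j _
    simp only [Function.comp_apply]
    have e1 : cnt + ((r.toNat : Int)) + (j : Int) * ((r.toNat : Int))
        = cnt + ((j.succ : Int)) * ((r.toNat : Int)) := by push_cast; ring
    rw [e1]

-- the trailing 'while counter < neurone_dim' loop appends range(counter, n) to the last group
theorem pvWhileA_append (n : Int) (xss : List (List Int)) (g : List Int) (cnt : Int) :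
    pvWhileA n (xss ++ [g]) cnt = xss ++ [g ++ PySem.List.pyRange cnt n 1] := by
  by_cases h : cnt < n
  · rw [pvWhileA, if_pos h, pvAppendLast_append, pvWhileA_append,
        PySem.List.pyRange_one_cons h]
    simp
  · rw [pvWhileA, if_neg h, PySem.List.pyRange_one_eq_nil (by omega)]
    simp
termination_by (n - cnt).toNat
decreasing_by omega

theorem pvWhileA_nil (n : Int) (cnt : Int) : pvWhileA n [] cnt = [] := by
  by_cases h : cnt < n
  · rw [pvWhileA, if_pos h]
    exact pvWhileA_nil n (cnt + 1)
  · rw [pvWhileA, if_neg h]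
termination_by (n - cnt).toNat
decreasing_by omega

-- groups other than the last agree whatever the sign of ration
theorem group_eq (j r : Int) :
    PySem.List.pyRange (j * (r.toNat : Int)) (j * (r.toNat : Int) + (r.toNat : Int)) 1
      = PySem.List.pyRange (j * r) (j * r + r) 1 := by
  rcases le_or_gt 0 r with h | h
  · rw [Int.toNat_of_nonneg h]
  · rw [Int.toNat_of_nonpos (le_of_lt h)]
    rw [PySem.List.pyRange_one_eq_nil (by omega), PySem.List.pyRange_one_eq_nil (by omega)]

-- c * (n / c) ≤ n for c ≠ 0, 0 ≤ n % c
theorem mul_ediv_le_self (n c : Int) (hc : c ≠ 0) : c * (n / c) ≤ n := by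
  have h1 := Int.mul_ediv_add_emod n c
  have h2 := Int.emod_nonneg n hc
  omega

-- ===== A = pvSpecForm =====
theorem a_eq_spec (n c : Int) (hpre : Pre_init_allocation n c) :
    init_allocation n c = pvSpecForm n c := by
  rcases hpre with ⟨hc0, hcases⟩
  simp only [init_allocation, pvSpecForm, pvTruncdiv_eq]
  rcases lt_or_gt_of_ne hc0 with hcneg | hc
  · -- col_dim < 0 (so neurone_dim ≤ 0): everything is empty on both sides
    have hn : n ≤ 0 := by omega
    rw [PySem.List.pyRange_one_eq_nil (by omega : c ≤ (0:Int))]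
    simp only [List.foldl_nil, List.map_nil]
    rw [pvWhileA_nil]
    have hz : c.toNat = 0 := by omega
    rw [hz]
    simp
  · -- col_dim > 0
    have hc' : (0:Int) ≤ c := le_of_lt hc
    obtain ⟨m, hm⟩ : ∃ m, c.toNat = m + 1 := ⟨c.toNat - 1, by omega⟩
    have hmc : ((m : Int)) + 1 = c := by omega
    rw [outerFold_eq (n.tdiv c) (PySem.List.pyRange 0 c 1) [] 0]
    rw [show (PySem.List.pyRange 0 c 1).length = c.toNat from by
          rw [PySem.List.length_pyRange_one]; norm_num]
    rw [PySem.List.pyRange_one 0 c]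
    rw [show ((c : Int) - 0).toNat = c.toNat from by norm_num]
    rw [hm]
    simp only [List.map_map, List.nil_append, zero_add]
    rw [List.range_succ]
    simp only [List.map_append, List.map_cons, List.map_nil]
    rw [pvWhileA_append]
    simp only [Prod.mk.injEq]
    refine ⟨?_, by simp [Function.comp_def, List.map_const', List.replicate_succ']⟩
    congr 1
    · -- the first m groups
      apply List.map_congr_left
      intro j hj
      have hjm : j < m := List.mem_range.mp hj
      simp only [Function.comp_apply]
      rw [if_neg (by omega : ¬ ((j:Nat):Int) = c - 1)]
      exact group_eq (j : Int) (n.tdiv c)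
    · -- the last group, with the remainder while-loop folded in
      simp only [Function.comp_apply, List.cons.injEq, and_true]
      rw [if_pos (by omega : ((m:Nat):Int) = c - 1)]
      rcases le_or_gt 0 n with hn | hn
      · -- 0 ≤ n: ration ≥ 0 and the two ranges concatenate
        have hr0 : 0 ≤ n.tdiv c := Int.tdiv_nonneg hn hc'
        rw [Int.toNat_of_nonneg hr0]
        have hstep : ((m + 1 : Nat) : Int) * n.tdiv c = (m : Int) * n.tdiv c + n.tdiv c := by
          push_cast; ring
        rw [hstep]
        have hub : (m : Int) * n.tdiv c + n.tdiv c ≤ n := by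
          have h1 : n.tdiv c = n / c := Int.tdiv_eq_ediv_of_nonneg hn
          have h2 : c * (n / c) ≤ n := mul_ediv_le_self n c hc0
          have h3 : (m : Int) * n.tdiv c + n.tdiv c = c * (n / c) := by
            rw [h1, ← hmc]; ring
          omega
        rw [← PySem.List.pyRange_one_append ((m : Int) * n.tdiv c) ((m : Int) * n.tdiv c + n.tdiv c) n
          (by linarith) hub]
      · -- n < 0: every range involved is empty
        have hq : 0 ≤ (-n).tdiv c := Int.tdiv_nonneg (by omega) hc'
        have hrn : n.tdiv c = -((-n).tdiv c) := by rw [Int.neg_tdiv, neg_neg]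
        have hrle : n.tdiv c ≤ 0 := by omega
        rw [show ((n.tdiv c).toNat : Int) = 0 from by rw [Int.toNat_of_nonpos hrle]; norm_num]
        have hqe : (-n).tdiv c = (-n) / c := Int.tdiv_eq_ediv_of_nonneg (by omega)
        have h2 : c * ((-n) / c) ≤ -n := mul_ediv_le_self (-n) c hc0
        have h3 : (m : Int) * ((-n).tdiv c) ≤ c * ((-n) / c) := by
          rw [hqe]
          exact mul_le_mul_of_nonneg_right (by omega : (m : Int) ≤ c) (by rw [← hqe]; exact hq)
        have hnil2 : n ≤ (m : Int) * n.tdiv c := by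
          have h4 : (m : Int) * n.tdiv c = -((m : Int) * ((-n).tdiv c)) := by rw [hrn]; ring
          omega
        rw [PySem.List.pyRange_one_eq_nil hnil2]
        simp only [mul_zero, add_zero]
        rw [PySem.List.pyRange_one_eq_nil (le_refl (0:Int)),
            PySem.List.pyRange_one_eq_nil (by omega : n ≤ (0:Int))]
        simp

-- ===== B = pvSpecForm =====

-- in-range bucket append in terms of List.set
theorem pvBucketAppend_eq (bs : List (List Int)) (g : Int) (x : Int)
    (h0 : 0 ≤ g) (h1 : g < (bs.length : Int)) :
    pvBucketAppend bs g x = bs.set g.toNat (bs[g.toNat]'(by omega) ++ [x]) := by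
  have h := PySem.List.pyGet?_eq_some_getElem (xs := bs) h0 h1
  simp only [pvBucketAppend, h]
  rw [PySem.List.pySetD_of_nonneg]
  exact h0

-- the scatter loop, bucket by bucket: bucket k collects (in order) the j with f j = k
theorem scatter_eq (f : Int → Int) (L : List Int) (bs : List (List Int))
    (hf : ∀ j ∈ L, 0 ≤ f j ∧ f j < (bs.length : Int)) :
    L.foldl (fun bs j => pvBucketAppend bs (f j) j) bs
      = bs.mapIdx (fun k b => b ++ L.filter (fun j => f j == (k : Int))) := by
  induction L generalizing bs with
  | nil =>
    apply List.ext_getElem (by simp)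
    intro i h1 h2
    simp
  | cons a t ih =>
    obtain ⟨ha0, ha1⟩ := hf a (List.mem_cons_self)
    rw [List.foldl_cons, pvBucketAppend_eq bs (f a) a ha0 ha1,
        ih _ (fun j hj => by simpa [List.length_set] using hf j (List.mem_cons_of_mem _ hj))]
    apply List.ext_getElem (by simp)
    intro i hL hR
    simp only [List.getElem_mapIdx, List.getElem_set, List.filter_cons]
    by_cases hik : (f a).toNat = i
    · have hfa : f a = (i : Int) := by omega
      simp [hik, hfa, List.append_assoc]
    · have hfa : ¬ (f a == (i : Int)) = true := by
        simp only [beq_iff_eq]; omega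
      simp [hik, hfa]

-- filtering an increasing unit range by an interval clips the range
theorem filter_pyRange_interval (a b lo hi : Int) :
    (PySem.List.pyRange a b 1).filter (fun j => decide (lo ≤ j ∧ j < hi))
      = PySem.List.pyRange (max a lo) (min b hi) 1 := by
  by_cases hab : b ≤ a
  · rw [PySem.List.pyRange_one_eq_nil hab, PySem.List.pyRange_one_eq_nil (by omega)]
    rfl
  · push_neg at hab
    rw [PySem.List.pyRange_one_cons hab, List.filter_cons]
    by_cases hc : lo ≤ a ∧ a < hi
    · rw [if_pos (by simpa using hc), filter_pyRange_interval (a+1) b lo hi]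
      rw [show max a lo = a from by omega,
          PySem.List.pyRange_one_cons (by omega : a < min b hi),
          show max (a+1) lo = a + 1 from by omega]
    · rw [if_neg (by simpa using hc), filter_pyRange_interval (a+1) b lo hi]
      push_neg at hc
      by_cases hlo : lo ≤ a
      · have hhi : hi ≤ a := hc hlo
        rw [PySem.List.pyRange_one_eq_nil (by omega), PySem.List.pyRange_one_eq_nil (by omega)]
      · rw [show max (a+1) lo = max a lo from by omega]
termination_by (b - a).toNat
decreasing_by all_goals omega

theorem b_eq_spec (n c : Int) (hpre : Pre_init_allocation n c) :
    init_allocation_alt n c = pvSpecForm n c := by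
  rcases hpre with ⟨hc0, hcases⟩
  simp only [init_allocation_alt, pvSpecForm, pvTruncdiv_eq]
  rcases lt_or_gt_of_ne hc0 with hcneg | hc
  · -- col_dim < 0 (so neurone_dim ≤ 0): both sides empty
    have hn : n ≤ 0 := by omega
    rw [PySem.List.pyRange_one_eq_nil (by omega : c ≤ (0:Int)),
        PySem.List.pyRange_one_eq_nil (by omega : n ≤ (0:Int))]
    simp
  · -- col_dim > 0
    refine Prod.ext ?_ rfl
    have hc' : (0:Int) ≤ c := le_of_lt hc
    set r := n.tdiv c with hr
    have hbslen : ((PySem.List.pyRange 0 c 1).map (fun _ => ([] : List Int))).length = c.toNat := by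
      simp [PySem.List.length_pyRange_one]
    -- the group-index function B uses
    set f : Int → Int := fun j =>
      if r > 0 then min (PySem.Int.floordiv j r) (c - 1) else c - 1 with hfdef
    have hfr : ∀ j ∈ PySem.List.pyRange 0 n 1, 0 ≤ f j ∧ f j < (((PySem.List.pyRange 0 c 1).map (fun _ => ([] : List Int))).length : Int) := by
      intro j hj
      rw [PySem.List.mem_pyRange_one] at hj
      rw [hbslen]
      have hcast : ((c.toNat : Int)) = c := Int.toNat_of_nonneg hc'
      rw [hcast, hfdef]
      by_cases hrpos : r > 0
      · simp only [if_pos hrpos]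
        have hd : 0 ≤ PySem.Int.floordiv j r := by
          rw [PySem.Int.floordiv_eq_ediv_of_pos hrpos]
          exact Int.ediv_nonneg hj.1 (le_of_lt hrpos)
        constructor
        · exact le_min hd (by omega)
        · exact lt_of_le_of_lt (min_le_right _ _) (by omega)
      · simp only [if_neg hrpos]; omega
    rw [scatter_eq f _ _ hfr]
    -- both sides are length-c.toNat lists; compare elementwise
    apply List.ext_getElem (by simp [PySem.List.length_pyRange_one])
    intro k hkL hkR
    simp only [List.getElem_mapIdx, List.getElem_map]
    have hkc : (k : Int) < c := by
      simp [PySem.List.length_pyRange_one] at hkR; omega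
    have hkval : (PySem.List.pyRange 0 c 1)[k]'(by simpa [hbslen] using hkL) = (k : Int) := by
      rw [PySem.List.getElem_pyRange_one]; omega
    rw [hkval]
    simp only [List.nil_append]
    -- case split matching B's guard
    by_cases hrpos : r > 0
    · -- r > 0: c*r ≤ n, and each group is a genuine interval
      have hn0 : 0 ≤ n := by
        by_contra h
        push_neg at h
        have hq : 0 ≤ (-n).tdiv c := Int.tdiv_nonneg (by omega) hc'
        have := Int.neg_tdiv n c
        omega
      have hre : r = n / c := by rw [hr]; exact Int.tdiv_eq_ediv_of_nonneg hn0
      have hcr : c * r ≤ n := by rw [hre]; exact mul_ediv_le_self n c hc0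
      have hrne : r ≠ 0 := by omega
      by_cases hk1 : (k : Int) = c - 1
      · -- last group: f j = c-1 ⟺ (c-1)*r ≤ j
        rw [if_pos hk1]
        have hcong : ∀ j ∈ PySem.List.pyRange 0 n 1,
            (f j == (k : Int)) = decide ((c-1) * r ≤ j ∧ j < n) := by
          intro j hj
          rw [PySem.List.mem_pyRange_one] at hj
          rw [hfdef]
          simp only [if_pos hrpos]
          rw [PySem.Int.floordiv_eq_ediv_of_pos hrpos, Bool.eq_iff_iff]
          simp only [beq_iff_eq, decide_eq_true_eq, hk1]
          rw [min_eq_right_iff, Int.le_ediv_iff_mul_le hrpos]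
          exact ⟨fun h => ⟨h, hj.2⟩, fun h => h.1⟩
        rw [List.filter_congr hcong, filter_pyRange_interval 0 n ((c-1)*r) n]
        rw [max_eq_right (mul_nonneg (by omega) (by omega)), min_self, hk1]
      · -- inner group k < c-1: f j = k ⟺ k*r ≤ j < k*r + r
        rw [if_neg hk1]
        have hklt : (k : Int) < c - 1 := by omega
        have hcong : ∀ j ∈ PySem.List.pyRange 0 n 1,
            (f j == (k : Int)) = decide ((k : Int) * r ≤ j ∧ j < (k : Int) * r + r) := by
          intro j hj
          rw [PySem.List.mem_pyRange_one] at hj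
          rw [hfdef]
          simp only [if_pos hrpos]
          rw [PySem.Int.floordiv_eq_ediv_of_pos hrpos, Bool.eq_iff_iff]
          simp only [beq_iff_eq, decide_eq_true_eq]
          constructor
          · intro hmk
            rcases le_or_gt (j / r) (c - 1) with hle | hgt
            · rw [min_eq_left hle] at hmk
              have hlow : (k : Int) * r ≤ j := by
                have h1 : j / r * r ≤ j := Int.ediv_mul_le j hrne
                rw [hmk] at h1; linarith
              have hup : j < (k : Int) * r + r := by
                have h2 : j < (j / r + 1) * r := Int.lt_ediv_add_one_mul_self j hrpos
                rw [hmk] at h2; nlinarith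
              exact ⟨hlow, hup⟩
            · rw [min_eq_right (le_of_lt hgt)] at hmk
              omega
          · rintro ⟨h1, h2⟩
            have hdq : j / r = (k : Int) := by
              have hA : (k : Int) ≤ j / r := by
                rw [Int.le_ediv_iff_mul_le hrpos]; linarith
              have hB : j / r < (k : Int) + 1 := by
                rw [Int.ediv_lt_iff_lt_mul hrpos]; nlinarith
              omega
            rw [hdq]
            exact min_eq_left (by omega)
        rw [List.filter_congr hcong, filter_pyRange_interval 0 n ((k:Int)*r) ((k:Int)*r + r)]
        rw [max_eq_right (mul_nonneg (by omega) (by omega))]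
        rw [min_eq_right (show (k:Int)*r + r ≤ n from by nlinarith)]
    · -- r ≤ 0 (so n ≤ 0, or 0 < n < c with r = 0): everything lands in the last bucket
      have hrle : r ≤ 0 := by omega
      have hcong : ∀ j ∈ PySem.List.pyRange 0 n 1,
          (f j == (k : Int)) = decide ((0:Int) ≤ j ∧ j < (if (k:Int) = c - 1 then n else 0)) := by
        intro j hj
        rw [PySem.List.mem_pyRange_one] at hj
        rw [hfdef]
        simp only [if_neg hrpos]
        rw [Bool.eq_iff_iff]
        simp only [beq_iff_eq, decide_eq_true_eq]
        by_cases hk1 : (k : Int) = c - 1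
        · rw [if_pos hk1, hk1]
          exact ⟨fun _ => ⟨hj.1, hj.2⟩, fun _ => rfl⟩
        · rw [if_neg hk1]
          exact ⟨fun h => absurd h.symm hk1, fun h => absurd h.2 (by omega)⟩
      rw [List.filter_congr hcong]
      by_cases hk1 : (k : Int) = c - 1
      · rw [if_pos hk1, if_pos hk1, filter_pyRange_interval 0 n 0 n]
        simp only [max_self, min_self]
        rw [hk1]
        rcases le_or_gt n 0 with hn | hn
        · rw [PySem.List.pyRange_one_eq_nil (by omega : n ≤ (0:Int)),
              PySem.List.pyRange_one_eq_nil (show n ≤ (c-1)*r from ?_)]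
          -- n ≤ (c-1) * r since r = tdiv n c and n ≤ 0 < c
          have hq : 0 ≤ (-n).tdiv c := Int.tdiv_nonneg (by omega) hc'
          have hrn : n.tdiv c = -((-n).tdiv c) := by rw [Int.neg_tdiv, neg_neg]
          have hqe : (-n).tdiv c = (-n) / c := Int.tdiv_eq_ediv_of_nonneg (by omega)
          have h2 : c * ((-n) / c) ≤ -n := mul_ediv_le_self (-n) c hc0
          have h3 : (c - 1 : Int) * ((-n).tdiv c) ≤ c * ((-n) / c) := by
            rw [hqe]
            exact mul_le_mul_of_nonneg_right (by omega : (c - 1 : Int) ≤ c) (by rw [← hqe]; exact hq)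
          have h4 : (c - 1 : Int) * r = -((c - 1 : Int) * ((-n).tdiv c)) := by
            rw [hr, hrn]; ring
          omega
        · -- 0 < n < c: r = 0 and the last group is exactly range(0, n)
          have hrz : r = 0 := by
            have he : r = n / c := by rw [hr]; exact Int.tdiv_eq_ediv_of_nonneg (by omega)
            have hnc : n < c := by
              by_contra hcc
              push_neg at hcc
              have h1c : 1 ≤ n / c := by rw [Int.le_ediv_iff_mul_le hc]; omega
              omega
            have h1 : n / c = 0 := Int.ediv_eq_zero_of_lt (by omega) hnc
            omega
          rw [hrz, mul_zero]
      · rw [if_neg hk1, if_neg hk1, filter_pyRange_interval 0 n 0 0]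
        rw [PySem.List.pyRange_one_eq_nil (by omega),
            PySem.List.pyRange_one_eq_nil (show (k:Int)*r + r ≤ (k:Int)*r from by
              have hk0 : (0:Int) ≤ (k:Int) := by omega
              nlinarith)]

-- ===== VERDICT (by name: the statement is the Claim_ definition above) =====
theorem init_allocation_spec : Claim_equal_init_allocation := by
  intro n c _ hpre
  unfold Spec_init_allocation
  rw [a_eq_spec n c hpre, b_eq_spec n c hpre]
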